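-- pv_equiv track=rewrite | github.com/EmersonPaul/MIT-OCW-Assignments | Ps4/TestCase1Support.py | shift_letter
-- ===== SOURCE A (Python) =====
-- import string
--
-- def shift_letter(shift):
--
--     assert shift >= 0 and shift < 26
--
--     alphabet_type = [string.ascii_lowercase, string.ascii_uppercase]
--     last_index = len(string.ascii_lowercase) - 1
--     shift_map = {}
--     for case in alphabet_type:
--         for letter in case:
--             shift_index = case.index(letter) + shift
--             if shift_index > last_index:
--                 shift_index = abs(shift_index - last_index) - 1
--             shift_map[letter] = case[shift_index]
--
--     return shift_map
-- ===== SOURCE B (Python) =====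
-- import string
--
-- def shift_letter(shift):
--     assert shift >= 0 and shift < 26
--     shift_map = {}
--     for case in (string.ascii_lowercase, string.ascii_uppercase):
--         rotated = case[shift:] + case[:shift]
--         shift_map.update(zip(case, rotated))
--     return shift_map
-- ===== Notes on version B (the rewrite author's own statement) =====
-- stated objective: simpler
-- what changed: Replaces the per-letter index lookup and conditional wrap-around arithmetic with a single slice rotation of each alphabet zipped against the original.
import Mathlib
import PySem

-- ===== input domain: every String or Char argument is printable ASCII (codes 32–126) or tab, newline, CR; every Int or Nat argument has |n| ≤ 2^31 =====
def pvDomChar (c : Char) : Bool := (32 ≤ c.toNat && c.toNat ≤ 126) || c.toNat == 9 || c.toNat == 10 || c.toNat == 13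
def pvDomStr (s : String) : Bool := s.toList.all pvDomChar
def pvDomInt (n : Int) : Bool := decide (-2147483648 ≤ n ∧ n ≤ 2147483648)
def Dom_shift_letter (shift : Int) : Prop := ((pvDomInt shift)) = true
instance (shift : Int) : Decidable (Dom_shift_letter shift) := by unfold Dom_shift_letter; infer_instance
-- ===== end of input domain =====

-- B replaces A's per-letter index lookup + conditional wrap with one slice rotation per case zipped
-- against the original alphabet (objective: simpler).

def pvLowerAlpha : String := "abcdefghijklmnopqrstuvwxyz"
def pvUpperAlpha : String := "ABCDEFGHIJKLMNOPQRSTUVWXYZ"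

-- ===== PORT A =====
-- case.index(letter) always succeeds here (letter ∈ case), so PySem.Str.find is exact;
-- case[shift_index] is in range under Pre_, the .getD "" default is never reached there.
def shift_letter (shift : Int) : List (String × String) :=
  let alphabet_type := [pvLowerAlpha, pvUpperAlpha]
  let last_index : Int := PySem.Str.len pvLowerAlpha - 1
  let shift_map : PySem.Dict String String :=
    alphabet_type.foldl (fun m cas =>
      cas.toList.foldl (fun m letter =>
        let shift_index := PySem.Str.find cas (String.ofList [letter]) + shift
        let shift_index := if shift_index > last_index then |shift_index - last_index| - 1 else shift_index
        m.insert (String.ofList [letter])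
          ((PySem.Str.pyGet? cas shift_index).map (fun c => String.ofList [c]) |>.getD "")
      ) m) PySem.Dict.empty
  shift_map.items

-- ===== PORT B =====
def shift_letter_alt (shift : Int) : List (String × String) :=
  let cases := [pvLowerAlpha, pvUpperAlpha]
  let shift_map : PySem.Dict String String :=
    cases.foldl (fun d cas =>
      let rotated := (PySem.Str.slice cas (some shift) none).toList
                      ++ (PySem.Str.slice cas none (some shift)).toList
      (cas.toList.zip rotated).foldl
        (fun d p => d.insert (String.ofList [p.1]) (String.ofList [p.2])) d) PySem.Dict.empty
  shift_map.items

-- ===== PRECONDITION & SPEC =====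
-- A's assert raises AssertionError unless 0 ≤ shift < 26.
def Pre_shift_letter (shift : Int) : Prop := 0 ≤ shift ∧ shift < 26
instance (shift : Int) : Decidable (Pre_shift_letter shift) := by unfold Pre_shift_letter; infer_instance
def pvWitness_shift_letter : Int := 3

def Spec_shift_letter (shift : Int) (out : List (String × String)) : Prop := out = shift_letter_alt shift
instance (shift : Int) (out : List (String × String)) : Decidable (Spec_shift_letter shift out) := by unfold Spec_shift_letter; infer_instance

-- ===== CLAIM (what is proved, stated in full; the proofs are below) =====
def Claim_equal_shift_letter : Prop := ∀ (shift : Int), Dom_shift_letter shift → Pre_shift_letter shift → Spec_shift_letter shift (shift_letter shift)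

-- ===== LEMMAS AND PROOFS =====

-- ===== VERDICT (by name: the statement is the Claim_ definition above) =====
set_option maxRecDepth 8192 in
set_option maxHeartbeats 2000000 in
theorem shift_letter_spec : Claim_equal_shift_letter := by
  unfold Claim_equal_shift_letter
  intro shift _ hpre
  obtain ⟨h0, h26⟩ := hpre
  unfold Spec_shift_letter
  interval_cases shift <;> rfl
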